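-- pv_equiv track=rewrite | github.com/brajiang/octopus | modify_data.py | dayCounter
-- ===== SOURCE A (Python) =====
-- dayCount = [31, 29, 31, 30, 31, 30, 31, 31, 30, 31, 30, 31]
--
-- def dayCounter(n):
--     r = n//1000000
--     s = (n//10000) % 100
--     count = 0
--     for i in range(r-1):
--         count = count + dayCount[i]
--     count = count + s
--     return count
-- ===== SOURCE B (Python) =====
-- # B: cumulative prefix-sum table lookup instead of the per-call accumulation loop.
-- _CUM = [0, 31, 60, 91, 121, 152, 182, 213, 244, 274, 305, 335, 366]
--
-- def dayCounter(n):
--     r = n // 1000000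
--     s = (n // 10000) % 100
--     return (_CUM[r - 1] if r > 1 else 0) + s
-- ===== Notes on version B (the rewrite author's own statement) =====
-- stated objective: alternative
-- what changed: Replaces the per-call accumulation loop over the month-length list with a single lookup into a precomputed 13-entry cumulative prefix-sum table.
import Mathlib
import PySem

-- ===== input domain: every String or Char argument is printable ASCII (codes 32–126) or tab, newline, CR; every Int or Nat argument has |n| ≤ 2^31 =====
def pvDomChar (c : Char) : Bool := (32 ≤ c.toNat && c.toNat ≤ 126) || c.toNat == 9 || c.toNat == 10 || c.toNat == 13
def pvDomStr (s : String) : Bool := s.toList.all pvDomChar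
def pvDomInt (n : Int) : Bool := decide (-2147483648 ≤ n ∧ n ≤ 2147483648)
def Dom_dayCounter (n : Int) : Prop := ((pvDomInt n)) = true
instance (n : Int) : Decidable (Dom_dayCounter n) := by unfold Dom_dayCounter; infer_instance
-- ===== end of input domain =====

-- B replaces A's per-call accumulation loop with one lookup in a precomputed 13-entry prefix-sum table (same results; loop is too short for a measurable speedup).


-- ===== PORT A =====
def pvDayCount : List Int := [31, 29, 31, 30, 31, 30, 31, 31, 30, 31, 30, 31]

def dayCounter (n : Int) : Int :=
  let r := PySem.Int.floordiv n 1000000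
  let s := PySem.Int.mod (PySem.Int.floordiv n 10000) 100
  let count : Int :=
    (PySem.List.pyRange 0 (r - 1) 1).foldl
      (fun c i => c + PySem.List.pyGetD pvDayCount i 0) 0
  count + s

-- ===== PORT B =====
def pvCum : List Int := [0, 31, 60, 91, 121, 152, 182, 213, 244, 274, 305, 335, 366]

def dayCounter_alt (n : Int) : Int :=
  let r := PySem.Int.floordiv n 1000000
  let s := PySem.Int.mod (PySem.Int.floordiv n 10000) 100
  (if r > 1 then PySem.List.pyGetD pvCum (r - 1) 0 else 0) + s

-- ===== PRECONDITION & SPEC =====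
-- Pre_ excludes exactly the inputs (n // 1000000 ≥ 14) on which A raises IndexError
-- indexing past the 12-entry month list; B raises IndexError there too.
def Pre_dayCounter (n : Int) : Prop := PySem.Int.floordiv n 1000000 ≤ 13
instance (n : Int) : Decidable (Pre_dayCounter n) := by unfold Pre_dayCounter; infer_instance
def pvWitness_dayCounter : Int := 3050000

def Spec_dayCounter (n : Int) (out : Int) : Prop := out = dayCounter_alt n
instance (n : Int) (out : Int) : Decidable (Spec_dayCounter n out) := by unfold Spec_dayCounter; infer_instance

-- ===== CLAIM (what is proved, stated in full; the proofs are below) =====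
def Claim_equal_dayCounter : Prop := ∀ (n : Int), Dom_dayCounter n → Pre_dayCounter n → Spec_dayCounter n (dayCounter n)

-- ===== LEMMAS AND PROOFS =====
-- The loop body and the table lookup agree for every r ≤ 13.
theorem pv_loop_eq_table (r : Int) (hr : r ≤ 13) :
    (PySem.List.pyRange 0 (r - 1) 1).foldl
      (fun c i => c + PySem.List.pyGetD pvDayCount i 0) 0
      = (if r > 1 then PySem.List.pyGetD pvCum (r - 1) 0 else 0) := by
  by_cases h : r ≤ 1
  · have hempty : PySem.List.pyRange 0 (r - 1) 1 = [] := by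
      rw [PySem.List.pyRange_one]
      have h0 : (r - 1 - 0).toNat = 0 := by omega
      rw [h0]; rfl
    simp [hempty, if_neg (by omega : ¬ r > 1)]
  · have h2 : 2 ≤ r := by omega
    interval_cases r <;> decide

-- ===== VERDICT (by name: the statement is the Claim_ definition above) =====
theorem dayCounter_spec : Claim_equal_dayCounter := by
  intro n _ hpre
  unfold Spec_dayCounter dayCounter dayCounter_alt
  simp only []
  rw [pv_loop_eq_table _ hpre]
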